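-- pv_equiv track=rewrite | github.com/VuNguyen123456/Leet-code-repo | Leet code/Get Frequent Query.py | getFrequentQueries
-- ===== SOURCE A (Python) =====
-- from collections import defaultdict
--
-- def getFrequentQueries(threshold, timestamps, queryTypes):
--     n = len(timestamps)
--
--     # Step 1: Group timestamps by query type
--     query_map = defaultdict(list)
--     for t, q in zip(timestamps, queryTypes):
--         query_map[q].append(t)
--
--     result = set()
--
--     # Step 2: For each query type, check 600-second windows
--     for q, times in query_map.items():
--         times.sort()  # make sure timestamps are increasing
--         left = 0
--         for right in range(len(times)):
--             # Move left pointer until window length is <= 600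
--             while times[right] - times[left] > 600:
--                 left += 1
--             # Number of queries in current window
--             if right - left + 1 >= threshold:
--                 result.add(q)
--                 break  # no need to check more for this query
--
--     return sorted(result)
-- ===== SOURCE B (Python) =====
-- def getFrequentQueries(threshold, timestamps, queryTypes):
--     # Group timestamps by query type
--     groups = {}
--     for t, q in zip(timestamps, queryTypes):
--         groups.setdefault(q, []).append(t)
--
--     # A query type qualifies iff some k consecutive timestamps (sorted)
--     # span at most 600 seconds, where k = max(threshold, 1): a fixed-width
--     # window check instead of a growing/sliding window.
--     k = max(threshold, 1)
--     res = []
--     for q, times in groups.items():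
--         ts = sorted(times)
--         if any(ts[i + k - 1] - ts[i] <= 600 for i in range(len(ts) - k + 1)):
--             res.append(q)
--     return sorted(res)
-- ===== Notes on version B (the rewrite author's own statement) =====
-- stated objective: alternative
-- what changed: The per-type sliding two-pointer window is replaced by a fixed-width window check: a type qualifies iff some max(threshold,1) consecutive sorted timestamps span at most 600 seconds; the result is accumulated as a plain list over the dict's (distinct) keys instead of a set.
import Mathlib
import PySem

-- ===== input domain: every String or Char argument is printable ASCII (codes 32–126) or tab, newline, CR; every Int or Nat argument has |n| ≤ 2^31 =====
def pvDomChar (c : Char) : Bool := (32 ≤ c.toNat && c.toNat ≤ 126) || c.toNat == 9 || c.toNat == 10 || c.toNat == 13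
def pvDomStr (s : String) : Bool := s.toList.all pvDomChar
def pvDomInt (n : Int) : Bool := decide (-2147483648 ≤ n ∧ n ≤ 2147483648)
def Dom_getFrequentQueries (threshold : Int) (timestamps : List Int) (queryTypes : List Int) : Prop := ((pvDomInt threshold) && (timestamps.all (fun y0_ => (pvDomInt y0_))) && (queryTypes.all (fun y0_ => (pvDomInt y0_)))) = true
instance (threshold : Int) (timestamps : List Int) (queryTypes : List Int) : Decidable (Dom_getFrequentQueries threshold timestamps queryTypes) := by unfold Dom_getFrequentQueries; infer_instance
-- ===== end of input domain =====

-- B replaces A's sliding two-pointer window with a fixed-width check — a type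
-- qualifies iff some max(threshold,1) consecutive sorted timestamps span ≤ 600 —
-- and accumulates the qualifying keys as a plain list instead of a set; same
-- asymptotic cost. (A also sorts each group's list in place; only the return
-- value is compared here.)


-- ===== PORT A =====
-- the `while times[right] - times[left] > 600: left += 1` loop; the index
-- guard only makes it total (Python never leaves the range here: left ≤ right < len)
def pvA_moveLeft (times : List Int) (tr : Int) (left : Nat) : Nat :=
  if _h : left < times.length then
    if 600 < tr - times.getD left 0 then pvA_moveLeft times tr (left + 1) else left
  else left
termination_by times.length - left

-- the `for right in range(len(times))` loop with the carried left pointer;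
-- returns whether `result.add(q); break` was reached
def pvA_scan (threshold : Int) (times : List Int) (right left : Nat) : Bool :=
  if _h : right < times.length then
    let l := pvA_moveLeft times (times.getD right 0) left
    if threshold ≤ (right : Int) - (l : Int) + 1 then true
    else pvA_scan threshold times (right + 1) l
  else false
termination_by times.length - right

def getFrequentQueries (threshold : Int) (timestamps : List Int) (queryTypes : List Int) : List Int :=
  let queryMap : PySem.Dict Int (List Int) :=
    (timestamps.zip queryTypes).foldl (fun d p => d.modify p.2 [] (· ++ [p.1])) PySem.Dict.empty
  let result : PySem.Set Int :=
    queryMap.items.foldl (fun s p =>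
      let times := PySem.List.sorted p.2 (fun x => x) false
      if pvA_scan threshold times 0 0 then PySem.Set.add s p.1 else s) PySem.Set.empty
  PySem.List.sorted result (fun x => x) false

-- ===== PORT B =====
-- `any(ts[i + k - 1] - ts[i] <= 600 for i in range(len(ts) - k + 1))`
-- (k ≥ 1 and i ranges below len-k+1, so both indices are in range; getD is exact)
def pvB_qual (k : Int) (ts : List Int) : Bool :=
  (PySem.List.pyRange 0 ((ts.length : Int) - k + 1) 1).any
    (fun i => ts.getD (i + k - 1).toNat 0 - ts.getD i.toNat 0 ≤ 600)

def getFrequentQueries_alt (threshold : Int) (timestamps : List Int) (queryTypes : List Int) : List Int :=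
  let groups : PySem.Dict Int (List Int) :=
    (timestamps.zip queryTypes).foldl (fun d p => d.modify p.2 [] (· ++ [p.1])) PySem.Dict.empty
  let k : Int := max threshold 1
  let res : List Int :=
    groups.items.foldl (fun r p =>
      if pvB_qual k (PySem.List.sorted p.2 (fun x => x) false) then r ++ [p.1] else r) []
  PySem.List.sorted res (fun x => x) false

-- ===== PRECONDITION & SPEC =====
def Spec_getFrequentQueries (threshold : Int) (timestamps : List Int) (queryTypes : List Int) (out : List Int) : Prop := out = getFrequentQueries_alt threshold timestamps queryTypes
instance (threshold : Int) (timestamps : List Int) (queryTypes : List Int) (out : List Int) : Decidable (Spec_getFrequentQueries threshold timestamps queryTypes out) := by unfold Spec_getFrequentQueries; infer_instance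

-- ===== CLAIM (what is proved, stated in full; the proofs are below) =====
def Claim_equal_getFrequentQueries : Prop := ∀ (threshold : Int) (timestamps : List Int) (queryTypes : List Int), Dom_getFrequentQueries threshold timestamps queryTypes → Spec_getFrequentQueries threshold timestamps queryTypes (getFrequentQueries threshold timestamps queryTypes)

-- ===== LEMMAS AND PROOFS =====

-- proof-side helper: A's scan with the left pointer recomputed by bisect each step
def pvScanBis (threshold : Int) (times : List Int) (right : Nat) : Bool :=
  if _h : right < times.length then
    let left := PySem.List.bisectLeft times (times.getD right 0 - 600)
    if threshold ≤ (right : Int) - (left : Int) + 1 then true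
    else pvScanBis threshold times (right + 1)
  else false
termination_by times.length - right

-- the two-pointer left, started at or below bisect_left(times, tr-600), lands exactly there
theorem pvA_moveLeft_eq_bisect (times : List Int) (tr : Int) (left : Nat)
    (hs : times.Pairwise (· ≤ ·))
    (hle : left ≤ PySem.List.bisectLeft times (tr - 600)) :
    pvA_moveLeft times tr left = PySem.List.bisectLeft times (tr - 600) := by
  obtain ⟨hb, hlt, hge⟩ := PySem.List.bisectLeft_spec times (tr - 600) hs
  fun_induction pvA_moveLeft times tr left with
  | case1 left h hc ih =>
    apply ih
    rcases Nat.lt_or_ge left (PySem.List.bisectLeft times (tr - 600)) with h' | h'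
    · omega
    · exfalso
      have hx := hge left h (by omega)
      rw [List.getD_eq_getElem times 0 h] at hc
      omega
  | case2 left h hc =>
    rcases Nat.lt_or_ge left (PySem.List.bisectLeft times (tr - 600)) with h' | h'
    · exfalso
      have hx := hlt left h h'
      rw [List.getD_eq_getElem times 0 h] at hc
      omega
    · omega
  | case3 left h =>
    omega

-- sorted list: the getD-values at in-range indices are monotone
theorem getD_mono (times : List Int) (hs : times.Pairwise (· ≤ ·))
    (i j : Nat) (hij : i ≤ j) (hj : j < times.length) :
    times.getD i 0 ≤ times.getD j 0 := by
  rw [List.getD_eq_getElem times 0 (lt_of_le_of_lt hij hj), List.getD_eq_getElem times 0 hj]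
  rcases Nat.eq_or_lt_of_le hij with rfl | h
  · exact le_refl _
  · exact (List.pairwise_iff_getElem.mp hs) i j _ hj h

-- bisect_left is monotone in the needle
theorem bisect_mono (times : List Int) (hs : times.Pairwise (· ≤ ·))
    (x y : Int) (hxy : x ≤ y) :
    PySem.List.bisectLeft times x ≤ PySem.List.bisectLeft times y := by
  obtain ⟨hbx, hltx, hgex⟩ := PySem.List.bisectLeft_spec times x hs
  obtain ⟨hby, hlty, hgey⟩ := PySem.List.bisectLeft_spec times y hs
  by_contra h
  rw [Nat.not_le] at h
  have hlen : PySem.List.bisectLeft times y < times.length := lt_of_lt_of_le h hbx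
  have h1 := hltx (PySem.List.bisectLeft times y) hlen (by omega)
  have h2 := hgey (PySem.List.bisectLeft times y) hlen (by omega)
  omega

-- the carried-left scan equals the bisect scan
theorem pvA_scan_eq (threshold : Int) (times : List Int) (right left : Nat)
    (hs : times.Pairwise (· ≤ ·))
    (hle : right < times.length → left ≤ PySem.List.bisectLeft times (times.getD right 0 - 600)) :
    pvA_scan threshold times right left = pvScanBis threshold times right := by
  fun_induction pvA_scan threshold times right left with
  | case1 right left h l hc =>
    rw [pvScanBis]
    simp only [h, dite_true]
    rw [show l = PySem.List.bisectLeft times (times.getD right 0 - 600) from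
      pvA_moveLeft_eq_bisect times (times.getD right 0) left hs (hle h)] at hc
    rw [if_pos hc]
  | case2 right left h l hc ih =>
    rw [pvScanBis]
    simp only [h, dite_true]
    have hl : l = PySem.List.bisectLeft times (times.getD right 0 - 600) :=
      pvA_moveLeft_eq_bisect times (times.getD right 0) left hs (hle h)
    rw [hl] at hc
    simp only [hc, ite_false]
    have hnext : right + 1 < times.length → l ≤ PySem.List.bisectLeft times (times.getD (right + 1) 0 - 600) := by
      intro h1
      rw [hl]
      exact bisect_mono times hs _ _ (by
        have := getD_mono times hs right (right + 1) (by omega) h1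
        omega)
    exact ih hnext
  | case3 right left h =>
    rw [pvScanBis]
    simp [h]

-- the bisect scan is an existential over the break position
theorem pvScanBis_iff (threshold : Int) (times : List Int) (right : Nat) :
    pvScanBis threshold times right = true ↔
    ∃ j : Nat, right ≤ j ∧ j < times.length ∧
      threshold ≤ (j : Int) - (PySem.List.bisectLeft times (times.getD j 0 - 600) : Int) + 1 := by
  fun_induction pvScanBis threshold times right with
  | case1 right h left hc =>
    simp only [true_iff]
    exact ⟨right, le_refl _, h, hc⟩
  | case2 right h left hc ih =>
    rw [ih]
    constructor
    · rintro ⟨j, h1, h2, h3⟩; exact ⟨j, by omega, h2, h3⟩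
    · rintro ⟨j, h1, h2, h3⟩
      refine ⟨j, ?_, h2, h3⟩
      rcases Nat.eq_or_lt_of_le h1 with rfl | h'
      · exact absurd h3 hc
      · omega
  | case3 right h =>
    constructor
    · intro hx; exact absurd hx Bool.false_ne_true
    · rintro ⟨j, h1, h2, _⟩; omega

-- B's fixed-width window check as an existential
theorem pvB_qual_iff (k : Int) (ts : List Int) :
    pvB_qual k ts = true ↔
    ∃ i : Int, 0 ≤ i ∧ i < (ts.length : Int) - k + 1 ∧
      ts.getD (i + k - 1).toNat 0 - ts.getD i.toNat 0 ≤ 600 := by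
  unfold pvB_qual
  rw [List.any_eq_true]
  constructor
  · rintro ⟨i, hm, hp⟩
    rw [PySem.List.mem_pyRange_one] at hm
    exact ⟨i, hm.1, hm.2, of_decide_eq_true hp⟩
  · rintro ⟨i, h0, h1, hp⟩
    exact ⟨i, PySem.List.mem_pyRange_one.mpr ⟨h0, h1⟩, decide_eq_true hp⟩

-- on a sorted list the two break conditions coincide
theorem scan_eq_qual (threshold : Int) (ts : List Int) (hs : ts.Pairwise (· ≤ ·)) :
    pvScanBis threshold ts 0 = pvB_qual (max threshold 1) ts := by
  apply Bool.eq_iff_iff.mpr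
  rw [pvScanBis_iff, pvB_qual_iff]
  constructor
  · rintro ⟨j, -, hj, hth⟩
    obtain ⟨hb, hlt, hge⟩ := PySem.List.bisectLeft_spec ts (ts.getD j 0 - 600) hs
    set bl := PySem.List.bisectLeft ts (ts.getD j 0 - 600) with hbl
    have hblj : bl ≤ j := by
      by_contra h
      have := hlt j hj (by omega)
      rw [List.getD_eq_getElem ts 0 hj] at this
      omega
    have hkle : max threshold 1 ≤ (j : Int) - (bl : Int) + 1 := by
      simp only [max_le_iff]
      constructor
      · exact hth
      · omega
    refine ⟨(j : Int) - max threshold 1 + 1, by omega, by omega, ?_⟩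
    have hi : ((j : Int) - max threshold 1 + 1 + max threshold 1 - 1).toNat = j := by omega
    rw [hi]
    have hitn : bl ≤ ((j : Int) - max threshold 1 + 1).toNat := by omega
    have h1 : ts.getD j 0 - 600 ≤ ts.getD bl 0 := by
      have := hge bl (by omega) (le_refl _)
      rw [List.getD_eq_getElem ts 0 (by omega : bl < ts.length)]
      exact this
    have h2 := getD_mono ts hs bl (((j : Int) - max threshold 1 + 1).toNat) hitn (by omega)
    omega
  · rintro ⟨i, h0, h1, hp⟩
    have hk1 : (1 : Int) ≤ max threshold 1 := le_max_right _ _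
    refine ⟨(i + max threshold 1 - 1).toNat, Nat.zero_le _, by omega, ?_⟩
    set j := (i + max threshold 1 - 1).toNat with hj
    have hjlen : j < ts.length := by omega
    obtain ⟨hb, hlt, hge⟩ := PySem.List.bisectLeft_spec ts (ts.getD j 0 - 600) hs
    set bl := PySem.List.bisectLeft ts (ts.getD j 0 - 600) with hbl
    have hbli : bl ≤ i.toNat := by
      by_contra h
      have := hlt i.toNat (by omega) (by omega)
      rw [← List.getD_eq_getElem ts 0 (by omega : i.toNat < ts.length)] at this
      omega
    have hthk : threshold ≤ max threshold 1 := le_max_left _ _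
    omega

-- accumulating distinct keys: the set-fold and the list-fold build the same list
theorem fold_set_eq_fold_list (cond : Int × List Int → Bool) (l : List (Int × List Int)) (s : List Int)
    (hdisj : ∀ p ∈ l, p.1 ∉ s) (hnd : (l.map Prod.fst).Nodup) :
    l.foldl (fun s p => if cond p then PySem.Set.add s p.1 else s) s
      = l.foldl (fun r p => if cond p then r ++ [p.1] else r) s := by
  induction l generalizing s with
  | nil => rfl
  | cons p t ih =>
    simp only [List.foldl_cons]
    simp only [List.map_cons, List.nodup_cons, List.mem_map] at hnd
    by_cases hc : cond p
    · rw [if_pos hc, if_pos hc]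
      have hadd : PySem.Set.add s p.1 = s ++ [p.1] := by
        simp [PySem.Set.add, PySem.Set.contains_eq_listContains]
        intro h
        exact absurd h (hdisj p (List.mem_cons_self))
      rw [hadd]
      apply ih
      · intro q hq
        simp only [List.mem_append, List.mem_singleton]
        rintro (h | h)
        · exact hdisj q (List.mem_cons_of_mem _ hq) h
        · exact hnd.1 ⟨q, hq, h⟩
      · exact hnd.2
    · rw [if_neg hc, if_neg hc]
      exact ih _ (fun q hq => hdisj q (List.mem_cons_of_mem _ hq)) hnd.2

-- ===== VERDICT (by name: the statement is the Claim_ definition above) =====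
theorem getFrequentQueries_spec : Claim_equal_getFrequentQueries := by
  intro threshold timestamps queryTypes _
  show _ = _
  unfold getFrequentQueries getFrequentQueries_alt
  simp only []
  set d := (timestamps.zip queryTypes).foldl (fun d p => d.modify p.2 [] (· ++ [p.1]))
      (PySem.Dict.empty : PySem.Dict Int (List Int)) with hd
  have hcond : ∀ ts : List Int,
      pvA_scan threshold (PySem.List.sorted ts (fun x => x) false) 0 0
        = pvB_qual (max threshold 1) (PySem.List.sorted ts (fun x => x) false) := by
    intro ts
    rw [pvA_scan_eq threshold _ 0 0 (PySem.List.sorted_pairwise ts (fun x => x))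
        (fun _ => Nat.zero_le _)]
    exact scan_eq_qual threshold _ (PySem.List.sorted_pairwise ts (fun x => x))
  have hfun : (fun (s : PySem.Set Int) (p : Int × List Int) =>
        if pvA_scan threshold (PySem.List.sorted p.2 (fun x => x) false) 0 0
        then PySem.Set.add s p.1 else s)
      = (fun (s : List Int) (p : Int × List Int) =>
        if pvB_qual (max threshold 1) (PySem.List.sorted p.2 (fun x => x) false)
        then PySem.Set.add s p.1 else s) := by
    funext s p
    rw [hcond p.2]
  rw [hfun]
  congr 1
  apply fold_set_eq_fold_list
  · intro p _ h
    exact absurd h (List.not_mem_nil)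
  · have hkeys : d.keys.Nodup :=
      PySem.Dict.nodup_keys_foldl_modify_key (timestamps.zip queryTypes) Prod.snd []
        (fun _ p => (· ++ [p.1])) PySem.Dict.empty PySem.Dict.nodup_keys_empty
    simpa [PySem.Dict.keys] using hkeys
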